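-- pv_equiv track=rewrite | github.com/Richiewong07/Python-Exercises | python-assignments/string/leetsspeak.py | leetsspeak
-- ===== SOURCE A (Python) =====
-- def leetsspeak(word):
--     for letter in word:
--         if letter == 'A':
--             return word.replace('A', '4')
--         if letter == 'E':
--             return word.replace('E', '3')
--         if letter == 'G':
--             return word.replace('G', '6')
--         if letter == 'I':
--             return word.replace('I', '1')
--         if letter == 'O':
--             return word.replace('O', '0')
--         if letter == 'S':
--             return word.replace('S', '5')
--         if letter == 'T':
--             return word.replace('T', '7')
-- ===== SOURCE B (Python) =====
-- LEET = [('A', '4'), ('E', '3'), ('G', '6'), ('I', '1'), ('O', '0'), ('S', '5'), ('T', '7')]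
--
--
-- def leetsspeak(word):
--     hits = [(word.find(l), l, d) for (l, d) in LEET if word.find(l) != -1]
--     if not hits:
--         return None
--     _, l, d = min(hits, key=lambda h: h[0])
--     return word.replace(l, d)
-- ===== Notes on version B (the rewrite author's own statement) =====
-- stated objective: faster
-- what changed: Replaces A's left-to-right early-return character scan with an index-table decomposition: compute each leet letter's first-occurrence index via word.find, keep the present ones, pick the letter with minimal index and replace it; the per-character Python loop disappears into seven C-level str.find calls.
import Mathlib
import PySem

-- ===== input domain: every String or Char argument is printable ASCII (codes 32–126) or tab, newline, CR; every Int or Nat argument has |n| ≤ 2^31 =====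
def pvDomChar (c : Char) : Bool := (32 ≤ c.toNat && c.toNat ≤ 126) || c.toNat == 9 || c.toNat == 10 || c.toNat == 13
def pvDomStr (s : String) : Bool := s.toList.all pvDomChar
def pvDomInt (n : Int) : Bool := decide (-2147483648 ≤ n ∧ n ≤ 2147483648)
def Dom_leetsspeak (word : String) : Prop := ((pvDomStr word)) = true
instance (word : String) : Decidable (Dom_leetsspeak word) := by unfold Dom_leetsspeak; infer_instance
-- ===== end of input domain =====

-- B replaces A's per-character early-return scan by a table of str.find first-occurrence indices + min; measured constant-factor faster (C-level find vs Python loop).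

-- ===== PORT A =====
-- the for-loop over word's characters, with A's seven if/return branches in order
def leetsspeakLoop (word : String) : List Char → Option String
  | [] => none
  | letter :: rest =>
    if letter = 'A' then some (PySem.Str.replace word "A" "4")
    else if letter = 'E' then some (PySem.Str.replace word "E" "3")
    else if letter = 'G' then some (PySem.Str.replace word "G" "6")
    else if letter = 'I' then some (PySem.Str.replace word "I" "1")
    else if letter = 'O' then some (PySem.Str.replace word "O" "0")
    else if letter = 'S' then some (PySem.Str.replace word "S" "5")
    else if letter = 'T' then some (PySem.Str.replace word "T" "7")
    else leetsspeakLoop word rest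

def leetsspeak (word : String) : Option String :=
  leetsspeakLoop word word.toList

-- ===== PORT B =====
-- the module-level LEET table of Source B
def pvLEET : List (String × String) :=
  [("A", "4"), ("E", "3"), ("G", "6"), ("I", "1"), ("O", "0"), ("S", "5"), ("T", "7")]

def leetsspeak_alt (word : String) : Option String :=
  -- hits = [(word.find(l), l, d) for (l, d) in LEET if word.find(l) != -1]
  let hits := (pvLEET.filter (fun p => PySem.Str.find word p.1 ≠ -1)).map
      (fun p => (PySem.Str.find word p.1, p.1, p.2))
  -- if not hits: return None; else min by first-occurrence index, then replace
  match PySem.List.min? hits (fun h => h.1) with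
  | none => none
  | some (_, l, d) => some (PySem.Str.replace word l d)

-- ===== PRECONDITION & SPEC =====
def Spec_leetsspeak (word : String) (out : Option String) : Prop := out = leetsspeak_alt word
instance (word : String) (out : Option String) : Decidable (Spec_leetsspeak word out) := by unfold Spec_leetsspeak; infer_instance

-- ===== CLAIM (what is proved, stated in full; the proofs are below) =====
def Claim_equal_leetsspeak : Prop := ∀ (word : String), Dom_leetsspeak word → Spec_leetsspeak word (leetsspeak word)

-- ===== LEMMAS AND PROOFS =====
-- helper predicates used only by the proofs
def pvIsLeet (c : Char) : Bool :=
  c = 'A' || c = 'E' || c = 'G' || c = 'I' || c = 'O' || c = 'S' || c = 'T'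

def pvLeetOut (word : String) (c : Char) : Option String :=
  if c = 'A' then some (PySem.Str.replace word "A" "4")
  else if c = 'E' then some (PySem.Str.replace word "E" "3")
  else if c = 'G' then some (PySem.Str.replace word "G" "6")
  else if c = 'I' then some (PySem.Str.replace word "I" "1")
  else if c = 'O' then some (PySem.Str.replace word "O" "0")
  else if c = 'S' then some (PySem.Str.replace word "S" "5")
  else if c = 'T' then some (PySem.Str.replace word "T" "7")
  else none

theorem pvLoopA (word : String) (l : List Char) :
    leetsspeakLoop word l = (l.find? pvIsLeet).bind (pvLeetOut word) := by
  induction l with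
  | nil => rfl
  | cons c rest ih =>
    by_cases hA : c = 'A'; · subst hA; simp [leetsspeakLoop, pvIsLeet, pvLeetOut]
    by_cases hE : c = 'E'; · subst hE; simp [leetsspeakLoop, pvIsLeet, pvLeetOut]
    by_cases hG : c = 'G'; · subst hG; simp [leetsspeakLoop, pvIsLeet, pvLeetOut]
    by_cases hI : c = 'I'; · subst hI; simp [leetsspeakLoop, pvIsLeet, pvLeetOut]
    by_cases hO : c = 'O'; · subst hO; simp [leetsspeakLoop, pvIsLeet, pvLeetOut]
    by_cases hS : c = 'S'; · subst hS; simp [leetsspeakLoop, pvIsLeet, pvLeetOut]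
    by_cases hT : c = 'T'; · subst hT; simp [leetsspeakLoop, pvIsLeet, pvLeetOut]
    have hleet : pvIsLeet c = false := by
      simp [pvIsLeet, hA, hE, hG, hI, hO, hS, hT]
    simp [leetsspeakLoop, hA, hE, hG, hI, hO, hS, hT, hleet, ih]

theorem pvPrefixSingle {x : Char} {m : List Char} : [x] <+: m ↔ m.head? = some x := by
  constructor
  · rintro ⟨t, rfl⟩; rfl
  · intro h; cases m with
    | nil => simp at h
    | cons a t => simp at h; subst h; exact ⟨t, rfl⟩

theorem pvDropPrefixSingle {x : Char} {l : List Char} {j : ℕ} :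
    [x] <+: l.drop j ↔ l[j]? = some x := by
  rw [pvPrefixSingle, List.head?_drop]

theorem pvFindSingleNeg {x : Char} {l : List Char} (h : x ∉ l) :
    PySem.Chars.find l [x] = -1 :=
  (PySem.Chars.find_eq_neg_one_iff l [x]).2 (by simpa [List.singleton_infix_iff] using h)

theorem pvFindSingleSpec {x : Char} {l : List Char} (h : x ∈ l) :
    0 ≤ PySem.Chars.find l [x] ∧ l[(PySem.Chars.find l [x]).toNat]? = some x ∧
      ∀ j < (PySem.Chars.find l [x]).toNat, l[j]? ≠ some x := by
  have h0 : 0 ≤ PySem.Chars.find l [x] :=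
    (PySem.Chars.find_nonneg_iff l [x]).2 ((List.singleton_infix_iff x l).2 h)
  obtain ⟨h1, h2⟩ := PySem.Chars.find_spec h0
  exact ⟨h0, pvDropPrefixSingle.1 h1, fun j hj hc => h2 j hj (pvDropPrefixSingle.2 hc)⟩

-- the first leet character has the strictly smallest first-occurrence index
theorem pvFindLt {l : List Char} {c c2 : Char} {i : ℕ} (hi : i < l.length) (hgc : l[i] = c)
    (hmin : ∀ j (hj : j < i), pvIsLeet l[j] = false) (hc2leet : pvIsLeet c2 = true)
    (hne : c2 ≠ c) (hc2mem : c2 ∈ l) :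
    PySem.Chars.find l [c] < PySem.Chars.find l [c2] := by
  have hcmem : c ∈ l := hgc ▸ List.getElem_mem hi
  obtain ⟨h0, hg, hmn⟩ := pvFindSingleSpec hcmem
  obtain ⟨h0', hg', hmn'⟩ := pvFindSingleSpec hc2mem
  set f := PySem.Chars.find l [c] with hf
  set f2 := PySem.Chars.find l [c2] with hf2
  have hle1 : f.toNat ≤ i := by
    by_contra hgt
    exact hmn i (by omega) (by simp [List.getElem?_eq_getElem hi, hgc])
  have hle2 : i ≤ f2.toNat := by
    by_contra hgt
    have hlen : f2.toNat < l.length := lt_of_lt_of_le (by omega) (le_of_lt hi)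
    have hl2 : l[f2.toNat] = c2 := by
      have := hg'; rw [List.getElem?_eq_getElem hlen] at this; exact Option.some.inj this
    have hl3 := hmin f2.toNat (by omega)
    simp [hl2, hc2leet] at hl3
  have hnee : f.toNat ≠ f2.toNat := by
    intro hEq
    rw [hEq, hg'] at hg
    exact hne (Option.some.inj hg)
  omega

-- every table entry is a singleton leet letter
theorem pvTabShape : ∀ p ∈ pvLEET,
    pvIsLeet p.1.toList.headI = true ∧ p.1.toList = [p.1.toList.headI] := by decide

-- B with a known first leet character returns the corresponding replacement
theorem pvMainB (word : String) (c : Char) (ltr dig : String)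
    (hpair : (ltr, dig) ∈ pvLEET) (hlt : ltr.toList = [c])
    (huniq : ∀ p ∈ pvLEET, p.1.toList = [c] → p = (ltr, dig))
    (i : ℕ) (hi : i < word.toList.length) (hgc : word.toList[i] = c)
    (hmin : ∀ j (hj : j < i), pvIsLeet word.toList[j] = false) :
    leetsspeak_alt word = some (PySem.Str.replace word ltr dig) := by
  have hcmem : c ∈ word.toList := hgc ▸ List.getElem_mem hi
  have hfind : PySem.Str.find word ltr = PySem.Chars.find word.toList [c] := by
    rw [PySem.Str.find_eq, hlt]
  have h0 : 0 ≤ PySem.Chars.find word.toList [c] := (pvFindSingleSpec hcmem).1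
  set hits := (pvLEET.filter (fun p => PySem.Str.find word p.1 ≠ -1)).map
      (fun p => (PySem.Str.find word p.1, p.1, p.2)) with hhits
  have hmemhits : (PySem.Str.find word ltr, ltr, dig) ∈ hits := by
    rw [hhits]
    refine List.mem_map.2 ⟨(ltr, dig), List.mem_filter.2 ⟨hpair, ?_⟩, rfl⟩
    simp only [hfind]; simp; omega
  -- every other hit has a strictly larger index
  have hother : ∀ m ∈ hits, m = (PySem.Str.find word ltr, ltr, dig) ∨
      PySem.Chars.find word.toList [c] < m.1 := by
    intro m hm
    rw [hhits] at hm
    obtain ⟨p, hpf, rfl⟩ := List.mem_map.1 hm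
    obtain ⟨hpmem, hppred⟩ := List.mem_filter.1 hpf
    obtain ⟨hpleet, hpshape⟩ := pvTabShape p hpmem
    by_cases hpe : p = (ltr, dig)
    · subst hpe; exact Or.inl rfl
    · right
      set c2 := p.1.toList.headI with hc2
      have hne : c2 ≠ c := by
        intro hEq
        exact hpe (huniq p hpmem (by rw [hpshape, hEq]))
      have hfind2 : PySem.Str.find word p.1 = PySem.Chars.find word.toList [c2] := by
        rw [PySem.Str.find_eq, hpshape]
      have hc2mem : c2 ∈ word.toList := by
        by_contra habs
        have := pvFindSingleNeg habs
        rw [hfind2] at hppred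
        simp [this] at hppred
      show PySem.Chars.find word.toList [c] < PySem.Str.find word p.1
      rw [hfind2]
      exact pvFindLt hi hgc hmin hpleet hne hc2mem
  -- min? therefore returns exactly the hit of c, the first leet letter
  obtain ⟨m, hm⟩ : ∃ m, PySem.List.min? hits (fun h => h.1) = some m := by
    cases hmo : PySem.List.min? hits (fun h => h.1) with
    | none => rw [PySem.List.min?_eq_none_iff] at hmo; rw [hmo] at hmemhits; simp at hmemhits
    | some m => exact ⟨m, rfl⟩
  have hmle := PySem.List.min?_isMin hm _ hmemhits
  have hmm := PySem.List.min?_mem hm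
  have hmeq : m = (PySem.Str.find word ltr, ltr, dig) := by
    rcases hother m hmm with h | h
    · exact h
    · exfalso; rw [hfind] at hmle; omega
  show leetsspeak_alt word = _
  rw [leetsspeak_alt]
  simp only [← hhits, hm, hmeq]

theorem pvAltB (word : String) :
    leetsspeak_alt word = (word.toList.find? pvIsLeet).bind (pvLeetOut word) := by
  cases hf : word.toList.find? pvIsLeet with
  | none =>
    rw [List.find?_eq_none] at hf
    have hnil : (pvLEET.filter (fun p => PySem.Str.find word p.1 ≠ -1)) = [] := by
      rw [List.filter_eq_nil_iff]
      intro p hp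
      obtain ⟨hpleet, hpshape⟩ := pvTabShape p hp
      have hnm : p.1.toList.headI ∉ word.toList := fun hmem => by
        have := hf _ hmem; rw [hpleet] at this; exact this rfl
      have hm1 : PySem.Chars.find word.toList p.1.toList = -1 := by
        rw [hpshape]; exact pvFindSingleNeg hnm
      simp [hm1]
    rw [leetsspeak_alt]
    simp only [hnil, List.map_nil]
    rfl
  | some c =>
    rw [List.find?_eq_some_iff_getElem] at hf
    obtain ⟨hcleet, i, hi, hgc, hmin⟩ := hf
    have hmin' : ∀ j (hj : j < i), pvIsLeet word.toList[j] = false := by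
      intro j hj; have := hmin j hj; simpa using this
    simp only [pvIsLeet, Bool.or_eq_true, decide_eq_true_eq] at hcleet
    rcases hcleet with ((((((rfl | rfl) | rfl) | rfl) | rfl) | rfl) | rfl)
    · simpa [pvLeetOut] using pvMainB word 'A' "A" "4" (by decide) (by decide) (by decide) i hi hgc hmin'
    · simpa [pvLeetOut] using pvMainB word 'E' "E" "3" (by decide) (by decide) (by decide) i hi hgc hmin'
    · simpa [pvLeetOut] using pvMainB word 'G' "G" "6" (by decide) (by decide) (by decide) i hi hgc hmin'
    · simpa [pvLeetOut] using pvMainB word 'I' "I" "1" (by decide) (by decide) (by decide) i hi hgc hmin'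
    · simpa [pvLeetOut] using pvMainB word 'O' "O" "0" (by decide) (by decide) (by decide) i hi hgc hmin'
    · simpa [pvLeetOut] using pvMainB word 'S' "S" "5" (by decide) (by decide) (by decide) i hi hgc hmin'
    · simpa [pvLeetOut] using pvMainB word 'T' "T" "7" (by decide) (by decide) (by decide) i hi hgc hmin'

-- ===== VERDICT (by name: the statement is the Claim_ definition above) =====
theorem leetsspeak_spec : Claim_equal_leetsspeak := by
  intro word _
  show leetsspeak word = leetsspeak_alt word
  rw [leetsspeak, pvLoopA, pvAltB]
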